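-- pv_equiv track=rewrite | github.com/Adam-Svec/pg | zkouska1.py | process_strings
-- ===== SOURCE A (Python) =====
-- def process_strings(strings):
--     result = []
--     for string in strings:
--         if string == "STOP":
--             break
--         if len(string) <= 3:
--             pass
--         else:
--             result.append(string.upper())
--     return result
-- ===== SOURCE B (Python) =====
-- def process_strings(strings):
--     try:
--         stop = strings.index("STOP")
--     except ValueError:
--         stop = len(strings)
--     return list(map(str.upper, filter(lambda s: len(s) > 3, strings[:stop])))
-- ===== Notes on version B (the rewrite author's own statement) =====
-- stated objective: alternative
-- what changed: B replaces A's single loop that breaks at the sentinel with a search-then-slice strategy: it locates the first "STOP" with list.index (falling back to the full length), slices the list up to that position, and then applies filter/map over the slice, so no traversal ever tests the sentinel while transforming.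
import Mathlib
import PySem

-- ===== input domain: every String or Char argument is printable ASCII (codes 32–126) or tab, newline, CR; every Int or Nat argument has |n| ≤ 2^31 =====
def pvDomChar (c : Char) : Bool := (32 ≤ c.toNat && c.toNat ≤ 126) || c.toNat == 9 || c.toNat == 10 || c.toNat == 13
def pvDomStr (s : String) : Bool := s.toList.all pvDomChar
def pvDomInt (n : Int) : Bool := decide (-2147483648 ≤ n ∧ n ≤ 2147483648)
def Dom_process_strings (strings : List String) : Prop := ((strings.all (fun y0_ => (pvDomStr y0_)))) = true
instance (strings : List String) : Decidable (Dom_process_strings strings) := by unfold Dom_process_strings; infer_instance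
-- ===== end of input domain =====

-- B replaces A's break-on-sentinel loop by search-then-slice: find the first "STOP" index, slice, then filter/map; objective: alternative.

-- ===== PORT A =====
-- literal port of A's loop: iterate, break on "STOP", skip short strings, append upper
def process_strings (strings : List String) : List String :=
  match strings with
  | [] => []
  | s :: rest =>
    if s == "STOP" then []
    else if PySem.Str.len s ≤ 3 then process_strings rest
    else PySem.Str.upper s :: process_strings rest

-- ===== PORT B =====
-- port of Source B: stop = index of "STOP" (or len), then map upper over filter (len > 3) of strings[:stop]
def process_strings_alt (strings : List String) : List String :=
  let stop : Int :=
    match PySem.List.index? strings "STOP" with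
    | some i => (i : Int)
    | none => (strings.length : Int)
  ((PySem.List.slice strings none (some stop)).filter (fun s => 3 < PySem.Str.len s)).map PySem.Str.upper

-- ===== PRECONDITION & SPEC =====
def Spec_process_strings (strings : List String) (out : List String) : Prop := out = process_strings_alt strings
instance (strings : List String) (out : List String) : Decidable (Spec_process_strings strings out) := by unfold Spec_process_strings; infer_instance

-- ===== CLAIM =====
def Claim_equal_process_strings : Prop := ∀ (strings : List String), Dom_process_strings strings → Spec_process_strings strings (process_strings strings)

-- ===== LEMMAS AND PROOFS =====
-- the slice up to the first "STOP" (or the whole list) is exactly the takeWhile prefix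
theorem take_stop (l : List String) :
    l.take ((PySem.List.index? l "STOP").getD l.length) = l.takeWhile (fun s => s != "STOP") := by
  induction l with
  | nil => rfl
  | cons s rest ih =>
    by_cases hstop : s = "STOP"
    · subst hstop
      rw [PySem.List.index?_cons_self]
      simp
    · rw [PySem.List.index?_cons_of_ne rest hstop]
      cases h : PySem.List.index? rest "STOP" with
      | none =>
        rw [h] at ih
        simp only [Option.getD_none] at ih
        simp [List.takeWhile_cons, hstop, ← ih]
      | some k =>
        rw [h] at ih
        simp only [Option.getD_some] at ih
        simp [List.takeWhile_cons, hstop, ← ih]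

theorem alt_eq_takeWhile (strings : List String) :
    process_strings_alt strings =
      ((strings.takeWhile (fun s => s != "STOP")).filter (fun s => 3 < PySem.Str.len s)).map PySem.Str.upper := by
  unfold process_strings_alt
  cases h : PySem.List.index? strings "STOP" with
  | none =>
    have h2 := take_stop strings; rw [h] at h2
    simp only [Option.getD_none] at h2
    rw [← h2]
    simp only [h, PySem.List.slice_to_natCast]
  | some k =>
    have h2 := take_stop strings; rw [h] at h2
    simp only [Option.getD_some] at h2
    rw [← h2]
    simp only [h, PySem.List.slice_to_natCast]

theorem process_strings_eq_alt (strings : List String) :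
    process_strings strings = process_strings_alt strings := by
  rw [alt_eq_takeWhile]
  induction strings with
  | nil => rfl
  | cons s rest ih =>
    by_cases hstop : s = "STOP"
    · simp [process_strings, hstop]
    · by_cases hlen : PySem.Str.len s ≤ 3
      · have hlen' : ¬ 3 < s.length := by simp [PySem.Str.len] at hlen; omega
        simp [process_strings, hstop, ih, hlen']
      · have hlen' : 3 < s.length := by simp [PySem.Str.len] at hlen; omega
        simp [process_strings, hstop, ih, hlen']

-- ===== VERDICT =====
theorem process_strings_spec : Claim_equal_process_strings := by
  intro strings _
  exact process_strings_eq_alt strings
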